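-- pv_equiv track=rewrite | github.com/ufal/edupo | scripts/finetuning/format_v4.py | _compute_rhyme_scheme
-- ===== SOURCE A (Python) =====
-- def _compute_rhyme_scheme(strophe):
--     """Compute rhyme scheme string and whether stanza has rhyming."""
--     abeceda = 'ABCDEFGHIJKLMNOPQRSTUVWXYZ'
--     scheme_numeric = [v['rhyme'] for v in strophe]
--     renum = {}
--     scheme = []
--     for n in scheme_numeric:
--         if n is None:
--             scheme.append('x')
--             continue
--         if n not in renum:
--             renum[n] = len(renum)
--         scheme.append(abeceda[renum[n] % len(abeceda)])
--     return ' '.join(scheme), len(renum) > 0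
-- ===== SOURCE B (Python) =====
-- def _compute_rhyme_scheme(strophe):
--     """Compute rhyme scheme string and whether stanza has rhyming."""
--     abeceda = 'ABCDEFGHIJKLMNOPQRSTUVWXYZ'
--     nums = [v['rhyme'] for v in strophe]
--     parts = []
--     for n in nums:
--         if n is None:
--             parts.append('x')
--         else:
--             before = nums[:nums.index(n)]
--             rank = len({m for m in before if m is not None})
--             parts.append(abeceda[rank % len(abeceda)])
--     return ' '.join(parts), any(n is not None for n in nums)
-- ===== Notes on version B (the rewrite author's own statement) =====
-- stated objective: alternative
-- what changed: B keeps no renumbering dict at all: for each verse it recomputes the letter index directly as the number of distinct non-None rhyme ids occurring strictly before that id's first occurrence (nums.index + a set over the prefix), and has_rhyming becomes any(n is not None); it trades A's single stateful O(n) dict pass for a stateless quadratic per-element computation.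
import Mathlib
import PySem

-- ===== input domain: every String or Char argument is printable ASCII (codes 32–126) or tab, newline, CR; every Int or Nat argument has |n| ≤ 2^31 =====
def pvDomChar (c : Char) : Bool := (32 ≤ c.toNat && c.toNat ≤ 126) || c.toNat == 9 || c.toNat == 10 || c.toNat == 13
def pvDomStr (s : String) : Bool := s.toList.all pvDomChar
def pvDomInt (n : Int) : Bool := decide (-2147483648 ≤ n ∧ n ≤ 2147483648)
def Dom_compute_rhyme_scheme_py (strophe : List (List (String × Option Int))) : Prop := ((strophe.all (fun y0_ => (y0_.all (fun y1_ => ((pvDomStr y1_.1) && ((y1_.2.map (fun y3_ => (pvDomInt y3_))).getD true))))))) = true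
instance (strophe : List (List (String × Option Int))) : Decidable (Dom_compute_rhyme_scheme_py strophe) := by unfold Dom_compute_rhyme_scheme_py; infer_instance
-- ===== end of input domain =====

-- ===== PORT A =====
-- B drops A's stateful renumbering dict: each verse's letter index is recomputed per element as
-- the count of distinct non-None rhyme ids before that id's first occurrence (list.index + a set
-- over the prefix). Equal return values on Pre_ (every verse has a 'rhyme' key); objective: alternative.

-- v['rhyme'] : first-match association-list lookup (exact for a Python dict). The `.getD none`
-- branch is unreachable inside Pre_ (Python raises KeyError there).
def lookupRhyme (v : List (String × Option Int)) : Option Int :=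
  ((v.find? (fun p => p.1 == "rhyme")).map Prod.snd).getD none

-- abeceda[i % len(abeceda)] as a 1-char string; i ≥ 0 at every call site so pyGet? is in range.
def rhymeLetter (i : Int) : String :=
  (((PySem.List.pyGet? "ABCDEFGHIJKLMNOPQRSTUVWXYZ".toList (PySem.Int.mod i 26)).map
      (fun c => String.ofList [c]))).getD ""

-- renum[n] : first-match lookup of the association-list dict (default unreachable: looked-up keys are present).
def lookIdx (d : List (Int × Int)) (v : Int) : Int :=
  ((d.find? (fun p => p.1 == v)).map Prod.snd).getD 0

-- one iteration of A's for-loop over (renum, scheme)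
def stepA (st : List (Int × Int) × List String) (n : Option Int) : List (Int × Int) × List String :=
  match n with
  | none => (st.1, st.2 ++ ["x"])
  | some v =>
    let renum := if (st.1.find? (fun p => p.1 == v)).isSome then st.1 else st.1 ++ [(v, (st.1.length : Int))]
    (renum, st.2 ++ [rhymeLetter (lookIdx renum v)])

def compute_rhyme_scheme_py (strophe : List (List (String × Option Int))) : String × Bool :=
  let scheme_numeric := strophe.map lookupRhyme
  let st := scheme_numeric.foldl stepA ([], [])
  (PySem.Str.join " " st.2, decide (st.1.length > 0))

-- ===== PORT B =====
-- rank of a non-None id v: len({m for m in nums[:nums.index(v)] if m is not None})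
-- (.getD 0 on index? is unreachable: some v is an element of nums at every call site)
def rankOf (nums : List (Option Int)) (v : Int) : Int :=
  let j := (PySem.List.index? nums (some v)).getD 0
  let before := PySem.List.slice nums none (some (j : Int))
  PySem.Set.len (PySem.Set.ofList (before.filterMap id))

def compute_rhyme_scheme_py_alt (strophe : List (List (String × Option Int))) : String × Bool :=
  let nums := strophe.map lookupRhyme
  let parts := nums.map (fun n =>
    match n with
    | none => "x"
    | some v => rhymeLetter (rankOf nums v))
  (PySem.Str.join " " parts, nums.any (fun n => n.isSome))

-- ===== PRECONDITION & SPEC =====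
-- Pre_ excludes exactly the verses without a 'rhyme' key, on which Python A raises KeyError.
def Pre_compute_rhyme_scheme_py (strophe : List (List (String × Option Int))) : Prop :=
  ∀ v ∈ strophe, "rhyme" ∈ v.map Prod.fst
instance (strophe : List (List (String × Option Int))) : Decidable (Pre_compute_rhyme_scheme_py strophe) := by
  unfold Pre_compute_rhyme_scheme_py; infer_instance

def pvWitness_compute_rhyme_scheme_py : (List (List (String × Option Int))) :=
  [[("rhyme", some 3)], [("rhyme", none)], [("rhyme", some 3)]]

def Spec_compute_rhyme_scheme_py (strophe : List (List (String × Option Int))) (out : String × Bool) : Prop := out = compute_rhyme_scheme_py_alt strophe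
instance (strophe : List (List (String × Option Int))) (out : String × Bool) : Decidable (Spec_compute_rhyme_scheme_py strophe out) := by unfold Spec_compute_rhyme_scheme_py; infer_instance

-- ===== CLAIM (what is proved, stated in full; the proofs are below) =====
def Claim_equal_compute_rhyme_scheme_py : Prop := ∀ (strophe : List (List (String × Option Int))), Dom_compute_rhyme_scheme_py strophe → Pre_compute_rhyme_scheme_py strophe → Spec_compute_rhyme_scheme_py strophe (compute_rhyme_scheme_py strophe)

-- ===== LEMMAS AND PROOFS =====

-- proof-side model of A's renum dict: the first-appearance list of non-None ids …
def uniqStep (U : List Int) (n : Option Int) : List Int :=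
  match n with
  | none => U
  | some v => PySem.Set.add U v

-- … paired with its enumeration {n : i}
def renumOf (U : List Int) : List (Int × Int) :=
  U.zipIdx.map (fun p => (p.1, (p.2 : Int)))

theorem renumOf_append (U : List Int) (w : Int) :
    renumOf (U ++ [w]) = renumOf U ++ [(w, (U.length : Int))] := by
  simp [renumOf, List.zipIdx_append]

theorem renumOf_length (U : List Int) : (renumOf U).length = U.length := by
  simp [renumOf]

theorem find?_zipIdx_mem (v : Int) : ∀ (U : List Int) (k : Nat), v ∈ U →
    (((U.zipIdx k).map (fun p => (p.1, (p.2 : Int)))).find? (fun p => p.1 == v))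
      = some (v, ((k + U.idxOf v : Nat) : Int))
  | [], _, h => by simp at h
  | (x :: U), k, h => by
    by_cases hx : x = v
    · simp [hx, List.idxOf_cons_self]
    · simp only [List.zipIdx_cons, List.map_cons]
      rw [List.find?_cons_of_neg (by simp [hx])]
      have hv : v ∈ U := by rcases List.mem_cons.mp h with h' | h'; exact absurd h'.symm hx; exact h'
      rw [find?_zipIdx_mem v U (k + 1) hv]
      have hne : x ≠ v := hx
      simp [List.idxOf_cons_ne _ (by simpa using hne)]
      omega

theorem lookIdx_renumOf (U : List Int) (v : Int) (hv : v ∈ U) :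
    lookIdx (renumOf U) v = ((U.idxOf v : Nat) : Int) := by
  unfold lookIdx renumOf
  rw [find?_zipIdx_mem v U 0 hv]
  simp

theorem find?_renumOf_isSome (U : List Int) (v : Int) :
    ((renumOf U).find? (fun p => p.1 == v)).isSome = U.contains v := by
  by_cases hv : v ∈ U
  · rw [show (renumOf U).find? (fun p => p.1 == v)
        = ((U.zipIdx 0).map (fun p => (p.1, (p.2 : Int)))).find? (fun p => p.1 == v) from rfl,
      find?_zipIdx_mem v U 0 hv]
    simpa using hv
  · have hnone : (renumOf U).find? (fun p => p.1 == v) = none := by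
      apply List.find?_eq_none.mpr
      intro p hp
      simp only [renumOf, List.mem_map] at hp
      rcases hp with ⟨q, hq, rfl⟩
      have hqm := List.fst_mem_of_mem_zipIdx hq
      simp only [beq_iff_eq]
      intro h; exact hv (h ▸ hqm)
    simp [hnone, hv]

theorem lookIdx_append_of_mem (U : List Int) (w v : Int) (hv : v ∈ U) :
    lookIdx (renumOf (U ++ [w])) v = lookIdx (renumOf U) v := by
  have h1 : ((renumOf U).find? (fun p => p.1 == v)).isSome = true := by
    rw [find?_renumOf_isSome]; simpa using hv
  rcases h : (renumOf U).find? (fun p => p.1 == v) with _ | p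
  · rw [h] at h1; simp at h1
  · simp [renumOf_append, lookIdx, List.find?_append, h]

theorem mem_uniqStep (U : List Int) (n : Option Int) (v : Int) (hv : v ∈ U) :
    v ∈ uniqStep U n := by
  cases n with
  | none => simpa [uniqStep]
  | some w => simp only [uniqStep]; exact (PySem.Set.mem_add _ _ _).mpr (Or.inl hv)

theorem lookIdx_uniqStep_of_mem (U : List Int) (n : Option Int) (v : Int) (hv : v ∈ U) :
    lookIdx (renumOf (uniqStep U n)) v = lookIdx (renumOf U) v := by
  cases n with
  | none => rfl
  | some w =>
    simp only [uniqStep, PySem.Set.add]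
    split
    · rfl
    · exact lookIdx_append_of_mem U w v hv

theorem lookIdx_foldl_of_mem (nums : List (Option Int)) (U : List Int) (v : Int) (hv : v ∈ U) :
    lookIdx (renumOf (nums.foldl uniqStep U)) v = lookIdx (renumOf U) v := by
  induction nums generalizing U with
  | nil => rfl
  | cons n rest ih =>
    simp only [List.foldl_cons]
    rw [ih _ (mem_uniqStep U n v hv), lookIdx_uniqStep_of_mem U n v hv]

-- main invariant for A: its fold from state (renumOf U, S) produces the dedup fold and
-- per-element lookups into the FINAL table
theorem fold_inv (nums : List (Option Int)) (U : List Int) (S : List String) :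
    nums.foldl stepA (renumOf U, S) =
      (renumOf (nums.foldl uniqStep U),
       S ++ nums.map (fun n =>
         match n with
         | none => "x"
         | some v => rhymeLetter (lookIdx (renumOf (nums.foldl uniqStep U)) v))) := by
  induction nums generalizing U S with
  | nil => simp
  | cons n rest ih =>
    cases n with
    | none =>
      simp only [List.foldl_cons, List.map_cons]
      rw [show stepA (renumOf U, S) none = (renumOf U, S ++ ["x"]) from rfl, ih]
      simp [uniqStep]
    | some v =>
      simp only [List.foldl_cons, List.map_cons]
      by_cases hmem : U.contains v
      · have hf : ((renumOf U).find? (fun p => p.1 == v)).isSome = true := by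
          rw [find?_renumOf_isSome]; exact hmem
        have hstep : stepA (renumOf U, S) (some v)
            = (renumOf U, S ++ [rhymeLetter (lookIdx (renumOf U) v)]) := by
          simp [stepA, hf]
        have hvmem : v ∈ U := by simpa using hmem
        rw [hstep, ih]
        have hU : uniqStep U (some v) = U := by simp [uniqStep, PySem.Set.add, hvmem]
        rw [hU, lookIdx_foldl_of_mem rest U v hvmem]
        simp
      · have hf : ((renumOf U).find? (fun p => p.1 == v)).isSome = false := by
          rw [find?_renumOf_isSome]; exact (Bool.not_eq_true _).mp hmem
        have hlen : ((renumOf U).length : Int) = (U.length : Int) := by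
          simp [renumOf]
        have hstep : stepA (renumOf U, S) (some v)
            = (renumOf (U ++ [v]), S ++ [rhymeLetter (lookIdx (renumOf (U ++ [v])) v)]) := by
          simp only [stepA, hf, Bool.false_eq_true, if_false]
          rw [renumOf_append, hlen]
        have hvmem : v ∈ U ++ [v] := by simp
        rw [hstep, ih]
        have hnm : v ∉ U := by simpa using hmem
        have hU : uniqStep U (some v) = U ++ [v] := by simp [uniqStep, PySem.Set.add, hnm]
        rw [hU, lookIdx_foldl_of_mem rest (U ++ [v]) v hvmem]
        simp

-- B-side bridges ---------------------------------------------------------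

-- the dedup fold over the Option list is the Set fold over the non-None values
theorem foldl_uniq_filterMap (nums : List (Option Int)) (U : List Int) :
    nums.foldl uniqStep U = (nums.filterMap id).foldl PySem.Set.add U := by
  induction nums generalizing U with
  | nil => rfl
  | cons n rest ih =>
    cases n with
    | none => simpa [uniqStep] using ih U
    | some v => simpa [uniqStep] using ih (PySem.Set.add U v)

theorem idxOf?_eq_some_idxOf {α : Type} [BEq α] [LawfulBEq α] (xs : List α) (v : α) (h : v ∈ xs) :
    List.idxOf? v xs = some (xs.idxOf v) := by
  induction xs with
  | nil => simp at h
  | cons x t ih =>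
    by_cases hx : x = v
    · simp [hx, List.idxOf?_cons, List.idxOf_cons_self]
    · have hv : v ∈ t := by rcases List.mem_cons.mp h with h' | h'; exact absurd h'.symm hx; exact h'
      simp [List.idxOf?_cons, hx, ih hv]

theorem idxOf_add_of_mem (W : List Int) (x v : Int) (hv : v ∈ W) :
    (PySem.Set.add W x).idxOf v = W.idxOf v := by
  unfold PySem.Set.add
  split
  · rfl
  · simp [List.idxOf_append, hv]

theorem idxOf_foldl_add (xs : List Int) (W : List Int) (v : Int) (hv : v ∈ W) :
    (xs.foldl PySem.Set.add W).idxOf v = W.idxOf v := by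
  induction xs generalizing W with
  | nil => rfl
  | cons x t ih =>
    simp only [List.foldl_cons]
    rw [ih _ ((PySem.Set.mem_add _ _ _).mpr (Or.inl hv)), idxOf_add_of_mem W x v hv]

-- the position of v in the first-appearance dedup = size of the dedup of the prefix
-- before v's first occurrence
theorem idxOf_foldl_eq_take_length (xs : List Int) (U : List Int) (v : Int)
    (hU : v ∉ U) (hv : v ∈ xs) :
    (xs.foldl PySem.Set.add U).idxOf v = ((xs.take (xs.idxOf v)).foldl PySem.Set.add U).length := by
  induction xs generalizing U with
  | nil => simp at hv
  | cons x t ih =>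
    by_cases hx : x = v
    · subst hx
      simp only [List.idxOf_cons_self, List.take_zero, List.foldl_nil, List.foldl_cons]
      have hcont : U.contains x = false := by simpa using hU
      have hadd : PySem.Set.add U x = U ++ [x] := by simp [PySem.Set.add, hU]
      rw [hadd, idxOf_foldl_add t (U ++ [x]) x (by simp)]
      simp [List.idxOf_append, hU]
    · have hvt : v ∈ t := by rcases List.mem_cons.mp hv with h' | h'; exact absurd h'.symm hx; exact h'
      rw [List.idxOf_cons_ne _ hx]
      simp only [List.take_succ_cons, List.foldl_cons]
      exact ih (PySem.Set.add U x) (fun hm => by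
        rcases (PySem.Set.mem_add _ _ _).mp hm with h' | h'
        · exact hU h'
        · exact hx h'.symm) hvt

-- the prefix of nums before (some v)'s first occurrence filters to the prefix of
-- nums.filterMap id before v's first occurrence
theorem filterMap_take_idxOf (nums : List (Option Int)) (v : Int) (hv : (some v) ∈ nums) :
    (nums.take (nums.idxOf (some v))).filterMap id
      = (nums.filterMap id).take ((nums.filterMap id).idxOf v) := by
  induction nums with
  | nil => simp at hv
  | cons m t ih =>
    cases m with
    | none =>
      have hvt : (some v) ∈ t := by
        rcases List.mem_cons.mp hv with h' | h'; exact absurd h' (by simp); exact h'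
      rw [List.idxOf_cons_ne _ (by simp)]
      simpa using ih hvt
    | some w =>
      by_cases hw : w = v
      · subst hw
        simp [List.idxOf_cons_self]
      · have hvt : (some v) ∈ t := by
          rcases List.mem_cons.mp hv with h' | h'
          · exact absurd (by injection h'.symm) hw
          · exact h'
        have hL : (some w :: t).idxOf (some v) = (t.idxOf (some v)).succ :=
          List.idxOf_cons_ne _ (by simpa using hw)
        have hR : List.filterMap id (some w :: t) = w :: List.filterMap id t := rfl
        rw [hL, List.take_succ_cons]
        rw [show List.filterMap id (some w :: t.take (t.idxOf (some v)))
              = w :: List.filterMap id (t.take (t.idxOf (some v))) from rfl]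
        rw [hR, List.idxOf_cons_ne _ hw, List.take_succ_cons, ih hvt]

-- rankOf computes v's position in the first-appearance dedup of the non-None ids
theorem rankOf_eq_idxOf (nums : List (Option Int)) (v : Int) (hv : (some v) ∈ nums) :
    rankOf nums v = (((nums.filterMap id).foldl PySem.Set.add []).idxOf v : Int) := by
  have hvx : v ∈ nums.filterMap id := List.mem_filterMap.mpr ⟨some v, hv, rfl⟩
  unfold rankOf
  rw [PySem.List.index?_eq_idxOf?, idxOf?_eq_some_idxOf nums (some v) hv]
  simp only [Option.getD_some]
  rw [PySem.List.slice_to_natCast, filterMap_take_idxOf nums v hv]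
  rw [show (PySem.Set.ofList (((nums.filterMap id).take ((nums.filterMap id).idxOf v)))
        = ((nums.filterMap id).take ((nums.filterMap id).idxOf v)).foldl PySem.Set.add []) from rfl]
  rw [PySem.Set.len, ← idxOf_foldl_eq_take_length (nums.filterMap id) [] v (by simp) hvx]

-- the has_rhyming flags agree
theorem bool_agree (nums : List (Option Int)) :
    decide (((nums.filterMap id).foldl PySem.Set.add ([] : List Int)).length > 0)
      = nums.any (fun n => n.isSome) := by
  by_cases hx : nums.filterMap id = []
  · have hall : ∀ n ∈ nums, n = none := by
      intro n hn
      cases n with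
      | none => rfl
      | some v =>
        exfalso
        have hvm : v ∈ List.filterMap id nums := List.mem_filterMap.mpr ⟨some v, hn, rfl⟩
        rw [hx] at hvm
        simp at hvm
    have hany : nums.any (fun n => n.isSome) = false := by
      simp only [List.any_eq_false]
      intro n hn; rw [hall n hn]; simp
    rw [hx, hany]; simp
  · rcases List.exists_cons_of_ne_nil hx with ⟨x, t, hxt⟩
    have hmem : x ∈ (nums.filterMap id).foldl PySem.Set.add ([] : List Int) := by
      rw [show ((nums.filterMap id).foldl PySem.Set.add ([] : List Int))
            = PySem.Set.ofList (nums.filterMap id) from rfl]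
      rw [PySem.Set.mem_ofList]
      rw [hxt]; simp
    have hlen : ((nums.filterMap id).foldl PySem.Set.add ([] : List Int)).length > 0 :=
      List.length_pos_of_mem hmem
    have hx' : x ∈ nums.filterMap id := by rw [hxt]; simp
    rcases List.mem_filterMap.mp hx' with ⟨n, hn, hid⟩
    have hany : nums.any (fun n => n.isSome) = true := by
      rw [List.any_eq_true]
      refine ⟨n, hn, ?_⟩
      cases n with
      | none => simp at hid
      | some w => simp
    rw [hany]; simpa using hlen

-- ===== VERDICT (by name: the statement is the Claim_ definition above) =====
theorem compute_rhyme_scheme_py_spec : Claim_equal_compute_rhyme_scheme_py := by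
  intro strophe _ _
  unfold Spec_compute_rhyme_scheme_py compute_rhyme_scheme_py compute_rhyme_scheme_py_alt
  have h := fold_inv (strophe.map lookupRhyme) [] []
  have h0 : renumOf ([] : List Int) = [] := rfl
  rw [h0] at h
  dsimp only
  rw [h]
  set nums := strophe.map lookupRhyme
  have hD : nums.foldl uniqStep [] = (nums.filterMap id).foldl PySem.Set.add [] :=
    foldl_uniq_filterMap nums []
  dsimp only
  rw [Prod.ext_iff]
  constructor
  · -- scheme strings agree
    simp only [List.nil_append]
    congr 1
    apply List.map_congr_left
    intro n hn
    cases n with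
    | none => rfl
    | some v =>
      have hv : (some v) ∈ nums := hn
      have hvx : v ∈ nums.filterMap id := List.mem_filterMap.mpr ⟨some v, hv, rfl⟩
      have hvD : v ∈ nums.foldl uniqStep [] := by
        rw [hD]
        rw [show ((nums.filterMap id).foldl PySem.Set.add ([] : List Int))
              = PySem.Set.ofList (nums.filterMap id) from rfl]
        exact (PySem.Set.mem_ofList _ _).mpr hvx
      show rhymeLetter (lookIdx (renumOf (List.foldl uniqStep [] nums)) v)
            = rhymeLetter (rankOf nums v)
      rw [lookIdx_renumOf _ v hvD, rankOf_eq_idxOf nums v hv, hD]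
  · -- has_rhyming flags agree
    rw [renumOf_length, hD]
    exact bool_agree nums
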